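-- pv_equiv track=rewrite | github.com/fralar-code/Compression-data-algorithms | src/BWT/bwt.py | define_type
-- ===== SOURCE A (Python) =====
-- def define_type(text):
--     # Types array stores the type (L, S, *) for each character in the text
--     types = [0] * len(text)
--     # Initialize the dollar sign type as S*
--     types[-1] = '*'
--     # Track initial indices of LMS factors
--     lms_indices = []
--     lms_indices.append(len(text) - 1)
--
--     for i in range(len(text) - 2, -1, -1):
--         if (text[i] < text[i+1]) or ((text[i] == text[i+1]) and ((types[i+1] == 'S') or (types[i+1] == '*'))):
--             if (i > 0 and (text[i-1] > text[i])):
--                 types[i] = '*'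
--                 lms_indices.insert(0, i)
--             else:
--                 types[i] = 'S'
--         elif (text[i] > text[i+1]) or ((text[i] == text[i+1]) and (types[i+1] == 'L')):
--             types[i] = 'L'
--
--     # Assign both start and end indices for LMS factors
--     for i in range(len(lms_indices) - 1):
--         lms_indices[i] = [lms_indices[i], lms_indices[i+1]]
--     lms_indices[-1] = [lms_indices[-1], lms_indices[-1]]
--
--     return types, lms_indices
-- ===== SOURCE B (Python) =====
-- def define_type(text):
--     n = len(text)
--     # Decompose the text into maximal runs of equal characters: (char, start, end).
--     runs = []
--     start = 0
--     while start < n: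
--         end = start + 1
--         while end < n and text[end] == text[start]:
--             end += 1
--         runs.append((text[start], start, end))
--         start = end
--     # Every position of a run has the same class; a run is S-class iff it is the
--     # last run or its character is smaller than the next run's first character.
--     # The start of an S-class run preceded by a greater character is an LMS star.
--     types = []
--     stars = []
--     i = 0
--     while i < len(runs):
--         c, s, e = runs[i]
--         i += 1
--         if i == len(runs) or c < runs[i][0]:
--             block = ['S'] * (e - s)
--             if s > 0 and text[s - 1] > c and s < n - 1:
--                 block[0] = '*'
--                 stars.append(s)
--             types += block
--         else:
--             types += ['L'] * (e - s)
--     types[n - 1] = '*'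
--     stars.append(n - 1)
--     pairs = [[stars[j], stars[j + 1]] for j in range(len(stars) - 1)]
--     pairs.append([stars[-1], stars[-1]])
--     return types, pairs
-- ===== Notes on version B (the rewrite author's own statement) =====
-- stated objective: alternative
-- what changed: B replaces A's backward per-character pass with index mutation and inline lms insert(0) by a run decomposition: it splits the text into maximal equal-character runs, classifies each whole run as S or L by comparing it with the next run's character (star = start of an S-run after a greater character), and derives the LMS pair list afterwards by a comprehension.
-- outside the precondition, e.g. on define_type(''): A raises IndexError, B raises IndexError
import Mathlib
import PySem

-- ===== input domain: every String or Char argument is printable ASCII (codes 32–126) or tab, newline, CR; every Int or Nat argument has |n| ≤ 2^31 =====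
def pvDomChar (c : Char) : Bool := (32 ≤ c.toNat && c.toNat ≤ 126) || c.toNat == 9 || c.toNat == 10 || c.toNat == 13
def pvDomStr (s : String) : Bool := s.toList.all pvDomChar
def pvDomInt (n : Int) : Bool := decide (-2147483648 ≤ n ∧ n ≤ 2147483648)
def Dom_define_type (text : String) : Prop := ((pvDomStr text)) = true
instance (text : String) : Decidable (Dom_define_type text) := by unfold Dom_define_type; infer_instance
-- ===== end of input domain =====

-- B replaces A's backward per-character scan (with in-place list mutation and inline insert(0))
-- by a decomposition into maximal equal-character runs classified whole against the next run;
-- objective: alternative algorithm, same exact return value.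

-- ===== PORT A =====
-- body of A's backward classification loop; state = (types, lms_indices)
def defineTypeStep (cs : List Char) (st : List String × List Int) (i : Int) :
    List String × List Int :=
  let a := PySem.List.pyGetD cs i ' '
  let b := PySem.List.pyGetD cs (i + 1) ' '
  let tn := PySem.List.pyGetD st.1 (i + 1) "0"
  if a < b ∨ (a = b ∧ (tn = "S" ∨ tn = "*")) then
    if i > 0 ∧ a < PySem.List.pyGetD cs (i - 1) ' ' then
      (PySem.List.pySetD st.1 i "*", i :: st.2)        -- lms_indices.insert(0, i)
    else
      (PySem.List.pySetD st.1 i "S", st.2)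
  else if a > b ∨ (a = b ∧ tn = "L") then
    (PySem.List.pySetD st.1 i "L", st.2)
  else st

def define_type (text : String) : List String × List (List Int) :=
  let cs := text.toList
  let n : Int := cs.length
  -- types = [0] * len(text); "0" stands for the int placeholder 0 (never equal to 'S'/'L'/'*')
  let types0 : List String := List.replicate cs.length "0"
  let types1 := PySem.List.pySetD types0 (-1) "*"       -- types[-1] = '*'
  let lms0 : List Int := [n - 1]                        -- lms_indices = []; .append(len(text)-1)
  let st := (PySem.List.pyRange (n - 2) (-1) (-1)).foldl (defineTypeStep cs) (types1, lms0)
  -- for i in range(len(lms)-1): lms[i] = [lms[i], lms[i+1]]; the value read at i+1 is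
  -- still the original int (mutation happens at smaller indices only), so building a fresh list is exact
  let pairs := (PySem.List.pyRange 0 ((st.2.length : Int) - 1) 1).foldl
      (fun acc i => acc ++ [[PySem.List.pyGetD st.2 i 0, PySem.List.pyGetD st.2 (i + 1) 0]]) []
  (st.1, pairs ++ [[PySem.List.pyGetD st.2 (-1) 0, PySem.List.pyGetD st.2 (-1) 0]])

-- ===== PORT B =====
-- inner while of Source B: while end < n and text[end] == text[start]: end += 1
-- (fuel = a totality guard only; called with fuel ≥ n - end it is exactly the while loop)
def runEnd (cs : List Char) (start : Nat) : Nat → Nat → Nat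
  | 0, e => e
  | fuel + 1, e =>
    if e < cs.length ∧ cs.getD e ' ' = cs.getD start ' ' then
      runEnd cs start fuel (e + 1)
    else e

-- outer while of Source B: while start < n: … runs.append((text[start], start, end)); start = end
-- (fuel = a totality guard only; called with fuel ≥ n - start it is exactly the while loop)
def buildRuns (cs : List Char) : Nat → Nat → List (Char × Nat × Nat)
  | 0, _ => []
  | fuel + 1, start =>
    if start < cs.length then
      (cs.getD start ' ', start, runEnd cs start cs.length (start + 1)) ::
        buildRuns cs fuel (runEnd cs start cs.length (start + 1))
    else []

-- second while of Source B: peel one run, classify it whole, append its block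
def blocksLoop (cs : List Char) (n : Nat) :
    List (Char × Nat × Nat) → List String × List Int → List String × List Int
  | [], acc => acc
  | (c, s, e) :: rest, acc =>
    if rest = [] ∨ c < (rest.headD (' ', 0, 0)).1 then
      let block := List.replicate (e - s) "S"
      if 0 < s ∧ c < cs.getD (s - 1) ' ' ∧ s < n - 1 then
        blocksLoop cs n rest (acc.1 ++ block.set 0 "*", acc.2 ++ [(s : Int)])
      else
        blocksLoop cs n rest (acc.1 ++ block, acc.2)
    else
      blocksLoop cs n rest (acc.1 ++ List.replicate (e - s) "L", acc.2)

def define_type_alt (text : String) : List String × List (List Int) :=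
  let cs := text.toList
  let n := cs.length
  let runs := buildRuns cs cs.length 0
  let st := blocksLoop cs n runs ([], [])
  let types := PySem.List.pySetD st.1 ((n : Int) - 1) "*"   -- types[n - 1] = '*'
  let stars := st.2 ++ [(n : Int) - 1]                      -- stars.append(n - 1)
  let pairs := (PySem.List.pyRange 0 ((stars.length : Int) - 1) 1).map
      (fun j => [PySem.List.pyGetD stars j 0, PySem.List.pyGetD stars (j + 1) 0])
  (types, pairs ++ [[PySem.List.pyGetD stars (-1) 0, PySem.List.pyGetD stars (-1) 0]])

-- ===== PRECONDITION & SPEC =====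
-- A's first statement writes the type of the last character (types[-1]); on the empty string that raises IndexError, so the empty string is excluded.
def Pre_define_type (text : String) : Prop := text ≠ ""
instance (text : String) : Decidable (Pre_define_type text) := by
  unfold Pre_define_type; infer_instance

def pvWitness_define_type : String := "banana"

def Spec_define_type (text : String) (out : List String × List (List Int)) : Prop :=
  out = define_type_alt text
instance (text : String) (out : List String × List (List Int)) :
    Decidable (Spec_define_type text out) := by unfold Spec_define_type; infer_instance

-- ===== CLAIM (what is proved, stated in full; the proofs are below) =====
def Claim_equal_define_type : Prop :=
  ∀ (text : String), Dom_define_type text → Pre_define_type text →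
    Spec_define_type text (define_type text)

-- ===== LEMMAS AND PROOFS =====

-- the type a fresh S-class position gets, given the preceding character
def starS (p : Option Char) (c : Char) : String :=
  match p with
  | some q => if c < q then "*" else "S"
  | none => "S"

-- right-to-left type spec, exactly A's rules; p = character preceding the list
def tR (p : Option Char) : List Char → List String
  | [] => []
  | [_] => ["*"]
  | a :: b :: rest =>
    let ts := tR (some a) (b :: rest)
    if a < b ∨ (a = b ∧ (ts.headD "0" = "S" ∨ ts.headD "0" = "*")) then
      starS p a :: ts
    else
      "L" :: ts

-- variant whose last entry is "S" instead of "*": what B's run loop produces before types[n-1] = '*'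
def tRS (p : Option Char) : List Char → List String
  | [] => []
  | [_] => ["S"]
  | a :: b :: rest =>
    let ts := tRS (some a) (b :: rest)
    if a < b ∨ (a = b ∧ (ts.headD "0" = "S" ∨ ts.headD "0" = "*")) then
      starS p a :: ts
    else
      "L" :: ts

-- character preceding position k
def pv (cs : List Char) (k : Nat) : Option Char :=
  if k = 0 then none else some (cs.getD (k - 1) ' ')

-- indices carrying "*", enumerated from off
def starsOff (off : Int) (ts : List String) : List Int :=
  ((PySem.List.enumerate ts off).filter (fun q => q.2 = "*")).map (·.1)

-- A's loop invariant state at cut k: positions < k still hold the placeholder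
def psiTypes (cs : List Char) (k : Nat) : List String :=
  List.replicate k "0" ++ tR (pv cs k) (cs.drop k)

def psiLms (cs : List Char) (k : Nat) : List Int :=
  starsOff (k : Int) (tR (pv cs k) (cs.drop k))

theorem starS_cases (p : Option Char) (c : Char) :
    starS p c = "S" ∨ starS p c = "*" := by
  cases p with
  | none => exact Or.inl rfl
  | some q =>
    by_cases h : c < q
    · exact Or.inr (by show (if c < q then "*" else "S") = "*"; rw [if_pos h])
    · exact Or.inl (by show (if c < q then "*" else "S") = "S"; rw [if_neg h])

theorem pySetD_neg_one {α : Type} (xs : List α) (v : α) (h : xs ≠ []) :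
    PySem.List.pySetD xs (-1) v = xs.set (xs.length - 1) v := by
  have h1 : 1 ≤ xs.length := by cases xs with | nil => exact absurd rfl h | cons a l => simp
  simp [PySem.List.pySetD, PySem.List.pySet?, PySem.List.pyIdx?, h1]

theorem set_replicate_last (k : Nat) (v : String) :
    (List.replicate (k + 1) "0").set k v = List.replicate k "0" ++ [v] := by
  rw [List.replicate_succ', List.set_append_right _ _ (by simp)]
  simp

theorem tR_shape (p : Option Char) (a : Char) (l : List Char) :
    ∃ t, tR p (a :: l) = t :: tR (some a) l ∧ (t = "S" ∨ t = "L" ∨ t = "*") := by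
  cases l with
  | nil => exact ⟨"*", by simp [tR], Or.inr (Or.inr rfl)⟩
  | cons b rest =>
    simp only [tR]
    by_cases hc : a < b ∨ (a = b ∧ ((tR (some a) (b :: rest)).headD "0" = "S" ∨
        (tR (some a) (b :: rest)).headD "0" = "*"))
    · exact ⟨starS p a, by rw [if_pos hc], by rcases starS_cases p a with h | h <;> simp [h]⟩
    · exact ⟨"L", by rw [if_neg hc], Or.inr (Or.inl rfl)⟩

theorem tRS_shape (p : Option Char) (a : Char) (l : List Char) :
    ∃ t, tRS p (a :: l) = t :: tRS (some a) l ∧ (t = "S" ∨ t = "L" ∨ t = "*") := by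
  cases l with
  | nil => exact ⟨"S", by simp [tRS], Or.inl rfl⟩
  | cons b rest =>
    simp only [tRS]
    by_cases hc : a < b ∨ (a = b ∧ ((tRS (some a) (b :: rest)).headD "0" = "S" ∨
        (tRS (some a) (b :: rest)).headD "0" = "*"))
    · exact ⟨starS p a, by rw [if_pos hc], by rcases starS_cases p a with h | h <;> simp [h]⟩
    · exact ⟨"L", by rw [if_neg hc], Or.inr (Or.inl rfl)⟩

theorem length_tRS (p : Option Char) (l : List Char) : (tRS p l).length = l.length := by
  induction l generalizing p with
  | nil => simp [tRS]
  | cons a l ih =>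
    obtain ⟨t, ht, -⟩ := tRS_shape p a l
    simp [ht, ih]

-- tR and tRS agree except on the last entry
theorem tR_tRS_split (p : Option Char) (l : List Char) (h : l ≠ []) :
    ∃ D, tR p l = D ++ ["*"] ∧ tRS p l = D ++ ["S"] := by
  induction l generalizing p with
  | nil => exact absurd rfl h
  | cons a l ih =>
    cases l with
    | nil => exact ⟨[], by simp [tR, tRS]⟩
    | cons b rest =>
      obtain ⟨D, hD1, hD2⟩ := ih (p := some a) (by simp)
      have hhead : ((tR (some a) (b :: rest)).headD "0" = "S" ∨
          (tR (some a) (b :: rest)).headD "0" = "*") ↔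
          ((tRS (some a) (b :: rest)).headD "0" = "S" ∨
          (tRS (some a) (b :: rest)).headD "0" = "*") := by
        rw [hD1, hD2]; cases D <;> simp
      simp only [tR, tRS]
      by_cases hc : a < b ∨ (a = b ∧ ((tRS (some a) (b :: rest)).headD "0" = "S" ∨
          (tRS (some a) (b :: rest)).headD "0" = "*"))
      · have hc' : a < b ∨ (a = b ∧ ((tR (some a) (b :: rest)).headD "0" = "S" ∨
            (tR (some a) (b :: rest)).headD "0" = "*")) := by
          rcases hc with h1 | ⟨h1, h2⟩
          · exact Or.inl h1
          · exact Or.inr ⟨h1, hhead.mpr h2⟩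
        exact ⟨starS p a :: D, by rw [if_pos hc', hD1]; rfl, by rw [if_pos hc, hD2]; rfl⟩
      · have hc' : ¬ (a < b ∨ (a = b ∧ ((tR (some a) (b :: rest)).headD "0" = "S" ∨
            (tR (some a) (b :: rest)).headD "0" = "*"))) := by
          intro hx
          rcases hx with h1 | ⟨h1, h2⟩
          · exact hc (Or.inl h1)
          · exact hc (Or.inr ⟨h1, hhead.mp h2⟩)
        exact ⟨"L" :: D, by rw [if_neg hc', hD1]; rfl, by rw [if_neg hc, hD2]; rfl⟩

theorem starsOff_cons (off : Int) (t : String) (ts : List String) :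
    starsOff off (t :: ts) = (if t = "*" then [off] else []) ++ starsOff (off + 1) ts := by
  simp only [starsOff, PySem.List.enumerate_cons, List.filter_cons]
  split_ifs with h <;> simp_all

theorem starsOff_append (off : Int) (xs ys : List String) :
    starsOff off (xs ++ ys) = starsOff off xs ++ starsOff (off + xs.length) ys := by
  simp [starsOff, PySem.List.enumerate_append, List.filter_append]

theorem starsOff_nostar (off : Int) (ts : List String) (h : ∀ x ∈ ts, x ≠ "*") :
    starsOff off ts = [] := by
  induction ts generalizing off with
  | nil => simp [starsOff]
  | cons t ts ih =>
    rw [starsOff_cons, if_neg (h t (by simp))]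
    simpa using ih (off + 1) (fun x hx => h x (by simp [hx]))

-- ===== A side =====

theorem psi_step (cs : List Char) (j : Nat) (hj : j + 2 ≤ cs.length) :
    defineTypeStep cs (psiTypes cs (j + 1), psiLms cs (j + 1)) (j : Int) =
      (psiTypes cs j, psiLms cs j) := by
  have hj0 : j < cs.length := by omega
  have hj1 : j + 1 < cs.length := by omega
  set A := cs.getD j ' ' with hA
  set B := cs.getD (j + 1) ' ' with hB
  set ts := tR (some A) (cs.drop (j + 1)) with hts
  have hcast1 : ((j : Int) + 1) = ((j + 1 : Nat) : Int) := by omega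
  have hget1 : PySem.List.pyGetD cs (j : Int) ' ' = A := by
    rw [PySem.List.pyGetD_natCast]
  have hget2 : PySem.List.pyGetD cs ((j : Int) + 1) ' ' = B := by
    rw [hcast1, PySem.List.pyGetD_natCast]
  have hpv1 : pv cs (j + 1) = some A := by simp [pv, hA]
  have hpsi1 : psiTypes cs (j + 1) = List.replicate (j + 1) "0" ++ ts := by
    rw [psiTypes, hpv1]
  have hlms1 : psiLms cs (j + 1) = starsOff ((j + 1 : Nat) : Int) ts := by
    rw [psiLms, hpv1]
  have htn : PySem.List.pyGetD (psiTypes cs (j + 1)) ((j : Int) + 1) "0" = ts.headD "0" := by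
    rw [hcast1, PySem.List.pyGetD_natCast, hpsi1, List.getD_eq_getElem?_getD,
      List.getElem?_append_right (by simp)]
    simp [List.headD_eq_head?, List.head?_eq_getElem?]
  have hd0 : cs.drop j = A :: cs.drop (j + 1) := by
    rw [hA, List.getD_eq_getElem cs ' ' hj0]
    exact (List.getElem_cons_drop hj0).symm
  have hd1 : cs.drop (j + 1) = B :: cs.drop (j + 2) := by
    rw [hB, List.getD_eq_getElem cs ' ' hj1]
    exact (List.getElem_cons_drop hj1).symm
  obtain ⟨t1, ht1, ht1c⟩ := tR_shape (some A) B (cs.drop (j + 2))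
  have htshape : ts = t1 :: tR (some B) (cs.drop (j + 2)) := by rw [hts, hd1, ht1]
  have htRj : tR (pv cs j) (cs.drop j) =
      if A < B ∨ (A = B ∧ (ts.headD "0" = "S" ∨ ts.headD "0" = "*")) then
        starS (pv cs j) A :: ts
      else "L" :: ts := by
    rw [hd0, hd1]
    simp only [tR]
    rw [← hd1]
  have hset : ∀ v : String,
      PySem.List.pySetD (psiTypes cs (j + 1)) (j : Int) v = List.replicate j "0" ++ v :: ts := by
    intro v
    rw [PySem.List.pySetD_natCast, hpsi1, List.replicate_succ', List.append_assoc,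
      List.set_append_right _ _ (by simp)]
    simp
  simp only [defineTypeStep, hget1, hget2, htn]
  rw [show psiTypes cs j = List.replicate j "0" ++ tR (pv cs j) (cs.drop j) from rfl,
    show psiLms cs j = starsOff (j : Int) (tR (pv cs j) (cs.drop j)) from rfl, htRj]
  by_cases hC : A < B ∨ (A = B ∧ (ts.headD "0" = "S" ∨ ts.headD "0" = "*"))
  · rw [if_pos hC, if_pos hC]
    by_cases hstar : 0 < j ∧ A < cs.getD (j - 1) ' '
    · have hkey : (j : Int) > 0 ∧ A < PySem.List.pyGetD cs ((j : Int) - 1) ' ' := by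
        refine ⟨by exact_mod_cast hstar.1, ?_⟩
        rw [show ((j : Int) - 1) = ((j - 1 : Nat) : Int) by omega, PySem.List.pyGetD_natCast]
        exact hstar.2
      rw [if_pos hkey, hset]
      have hpvj : pv cs j = some (cs.getD (j - 1) ' ') := by
        rw [pv, if_neg (by omega : ¬ j = 0)]
      have hsS : starS (pv cs j) A = "*" := by
        rw [hpvj]
        show (if A < cs.getD (j - 1) ' ' then "*" else "S") = "*"
        rw [if_pos hstar.2]
      rw [hsS, starsOff_cons, if_pos rfl, hlms1, hcast1]
      rfl
    · have hkey : ¬ ((j : Int) > 0 ∧ A < PySem.List.pyGetD cs ((j : Int) - 1) ' ') := by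
        rintro ⟨h1, h2⟩
        have h1' : 0 < j := by exact_mod_cast h1
        rw [show ((j : Int) - 1) = ((j - 1 : Nat) : Int) by omega,
          PySem.List.pyGetD_natCast] at h2
        exact hstar ⟨h1', h2⟩
      rw [if_neg hkey, hset]
      have hsS : starS (pv cs j) A = "S" := by
        by_cases hz : j = 0
        · rw [pv, if_pos hz]; rfl
        · have hnlt : ¬ A < cs.getD (j - 1) ' ' := fun hlt => hstar ⟨by omega, hlt⟩
          rw [pv, if_neg hz]
          show (if A < cs.getD (j - 1) ' ' then "*" else "S") = "S"
          rw [if_neg hnlt]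
      rw [hsS, starsOff_cons, if_neg (by simp), hlms1, hcast1]
      rfl
  · rw [if_neg hC, if_neg hC]
    have hhead : ts.headD "0" = t1 := by rw [htshape]; rfl
    have hL : A > B ∨ (A = B ∧ ts.headD "0" = "L") := by
      rcases lt_trichotomy A B with h | h | h
      · exact absurd (Or.inl h) hC
      · rcases ht1c with h1 | h1 | h1
        · exact absurd (Or.inr ⟨h, by rw [hhead, h1]; exact Or.inl rfl⟩) hC
        · exact Or.inr ⟨h, by rw [hhead, h1]⟩
        · exact absurd (Or.inr ⟨h, by rw [hhead, h1]; exact Or.inr rfl⟩) hC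
      · exact Or.inl h
    rw [if_pos hL, hset, starsOff_cons, if_neg (by simp), hlms1, hcast1]
    rfl

theorem psi_fold (cs : List Char) (j : Nat) (hj : j + 2 ≤ cs.length) :
    (PySem.List.pyRange (j : Int) (-1) (-1)).foldl (defineTypeStep cs)
        (psiTypes cs (j + 1), psiLms cs (j + 1)) =
      (psiTypes cs 0, psiLms cs 0) := by
  induction j with
  | zero =>
    rw [PySem.List.pyRange_neg_one_cons (by norm_num),
      show ((0 : Nat) : Int) - 1 = -1 by norm_num,
      PySem.List.pyRange_neg_one_eq_nil (by norm_num)]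
    simp only [List.foldl_cons, List.foldl_nil]
    exact psi_step cs 0 hj
  | succ k ih =>
    rw [PySem.List.pyRange_neg_one_cons (by omega),
      show ((k + 1 : Nat) : Int) - 1 = ((k : Nat) : Int) by omega,
      List.foldl_cons, psi_step cs (k + 1) hj, ih (by omega)]

theorem A_char (text : String) (h : text.toList ≠ []) :
    define_type text =
      (tR none text.toList,
        ((PySem.List.pyRange 0 (((psiLms text.toList 0).length : Int) - 1) 1).map
          (fun j => [PySem.List.pyGetD (psiLms text.toList 0) j 0,
                     PySem.List.pyGetD (psiLms text.toList 0) (j + 1) 0])) ++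
        [[PySem.List.pyGetD (psiLms text.toList 0) (-1) 0,
          PySem.List.pyGetD (psiLms text.toList 0) (-1) 0]]) := by
  set cs := text.toList with hcs
  have hn : 0 < cs.length := by
    cases hl : cs with
    | nil => exact absurd hl h
    | cons a l => simp [hl]
  obtain ⟨c0, hc0⟩ := List.length_eq_one_iff.mp
    (show (cs.drop (cs.length - 1)).length = 1 by simp; omega)
  have htypes1 : PySem.List.pySetD (List.replicate cs.length "0") (-1) "*" =
      psiTypes cs (cs.length - 1) := by
    rw [pySetD_neg_one _ _ (by simp; omega)]
    rw [psiTypes, hc0]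
    simp only [tR]
    have hrw := set_replicate_last (cs.length - 1) "*"
    rw [show cs.length - 1 + 1 = cs.length by omega] at hrw
    rw [show (List.replicate cs.length "0").length - 1 = cs.length - 1 by simp, hrw]
  have hlms0 : [(cs.length : Int) - 1] = psiLms cs (cs.length - 1) := by
    rw [psiLms, hc0]
    simp only [tR]
    rw [starsOff_cons, if_pos rfl]
    simp [starsOff]
    omega
  have hfold : (PySem.List.pyRange ((cs.length : Int) - 2) (-1) (-1)).foldl (defineTypeStep cs)
      (psiTypes cs (cs.length - 1), psiLms cs (cs.length - 1)) =
      (psiTypes cs 0, psiLms cs 0) := by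
    rcases Nat.lt_or_ge cs.length 2 with h2 | h2
    · have hn1 : cs.length = 1 := by omega
      rw [PySem.List.pyRange_neg_one_eq_nil (by rw [hn1]; norm_num)]
      simp [hn1]
    · have hfix := psi_fold cs (cs.length - 2) (by omega)
      rw [show cs.length - 2 + 1 = cs.length - 1 by omega] at hfix
      rw [show ((cs.length : Int) - 2) = ((cs.length - 2 : Nat) : Int) by omega, hfix]
  have hpsi0 : psiTypes cs 0 = tR none cs := by simp [psiTypes, pv]
  simp only [define_type]
  rw [← hcs, htypes1, hlms0, hfold]
  simp only [PySem.List.foldl_append_singleton_eq_map, List.nil_append, hpsi0]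

-- ===== B side =====

theorem le_runEnd (cs : List Char) (start : Nat) :
    ∀ (f e : Nat), e ≤ runEnd cs start f e := by
  intro f
  induction f with
  | zero => intro e; exact Nat.le_refl e
  | succ f ih =>
    intro e
    rw [runEnd]
    split_ifs with h
    · exact le_trans (by omega) (ih (e + 1))
    · exact Nat.le_refl e

theorem runEnd_spec (cs : List Char) (s : Nat) :
    ∀ (f e : Nat),
      (∀ i, e ≤ i → i < runEnd cs s f e → cs.getD i ' ' = cs.getD s ' ') ∧
      (e ≤ cs.length → runEnd cs s f e ≤ cs.length) ∧
      (cs.length ≤ e + f → runEnd cs s f e < cs.length →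
        cs.getD (runEnd cs s f e) ' ' ≠ cs.getD s ' ') := by
  intro f
  induction f with
  | zero =>
    intro e
    refine ⟨fun i h1 h2 => absurd h2 (by simp [runEnd]; omega), fun h => by simpa [runEnd] using h,
      fun h1 h2 => absurd h2 (by simp [runEnd] at *; omega)⟩
  | succ f ih =>
    intro e
    rw [runEnd]
    split_ifs with h
    · obtain ⟨ih1, ih2, ih3⟩ := ih (e + 1)
      refine ⟨?_, fun _ => ih2 (by omega), fun hf => ih3 (by omega)⟩
      intro i h1 h2
      rcases Nat.eq_or_lt_of_le h1 with rfl | hlt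
      · exact h.2
      · exact ih1 i (by omega) h2
    · exact ⟨fun i h1 h2 => absurd h2 (by omega), fun hle => hle,
        fun _ hlt heq => h ⟨hlt, heq⟩⟩

theorem buildRuns_nil (cs : List Char) (f : Nat) (s : Nat) (h : cs.length ≤ s) :
    buildRuns cs f s = [] := by
  cases f with
  | zero => rfl
  | succ f => rw [buildRuns, if_neg (by omega)]

-- run block lemmas on tRS
theorem tRS_run_final (p : Option Char) (c : Char) (m : Nat) :
    tRS p (List.replicate (m + 1) c) =
      if m = 0 then ["S"] else starS p c :: List.replicate m "S" := by
  induction m generalizing p with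
  | zero => simp [tRS]
  | succ m ih =>
    rw [show List.replicate (m + 1 + 1) c = c :: c :: List.replicate m c by
      simp [List.replicate_succ]]
    simp only [tRS]
    rw [show (c :: List.replicate m c) = List.replicate (m + 1) c by simp [List.replicate_succ],
      ih (some c)]
    by_cases hm : m = 0
    · subst hm
      simp [starS]
    · simp [hm, starS, List.replicate_succ]

theorem tRS_run_S (p : Option Char) (c d : Char) (m : Nat) (l : List Char) (hcd : c < d) :
    tRS p (List.replicate (m + 1) c ++ d :: l) =
      starS p c :: (List.replicate m "S" ++ tRS (some c) (d :: l)) := by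
  induction m generalizing p with
  | zero =>
    rw [show List.replicate (0 + 1) c ++ d :: l = c :: d :: l by simp]
    simp only [tRS]
    rw [if_pos (Or.inl hcd)]
    simp
  | succ m ih =>
    rw [show List.replicate (m + 1 + 1) c ++ d :: l =
        c :: (List.replicate (m + 1) c ++ d :: l) by simp [List.replicate_succ]]
    rw [show List.replicate (m + 1) c ++ d :: l =
        c :: (List.replicate m c ++ d :: l) by simp [List.replicate_succ]]
    simp only [tRS]
    rw [show (c :: (List.replicate m c ++ d :: l)) = List.replicate (m + 1) c ++ d :: l by
      simp [List.replicate_succ], ih (some c)]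
    simp [starS, List.replicate_succ]

theorem tRS_run_L (p : Option Char) (c d : Char) (m : Nat) (l : List Char) (hdc : d < c) :
    tRS p (List.replicate (m + 1) c ++ d :: l) =
      List.replicate (m + 1) "L" ++ tRS (some c) (d :: l) := by
  induction m generalizing p with
  | zero =>
    rw [show List.replicate (0 + 1) c ++ d :: l = c :: d :: l by simp]
    simp only [tRS]
    rw [if_neg]
    · simp
    · rintro (hx | ⟨hx, -⟩)
      · exact absurd hx (not_lt_of_gt hdc)
      · exact (ne_of_gt hdc) hx
  | succ m ih =>
    rw [show List.replicate (m + 1 + 1) c ++ d :: l =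
        c :: (List.replicate (m + 1) c ++ d :: l) by simp [List.replicate_succ]]
    rw [show List.replicate (m + 1) c ++ d :: l =
        c :: (List.replicate m c ++ d :: l) by simp [List.replicate_succ]]
    simp only [tRS]
    rw [show (c :: (List.replicate m c ++ d :: l)) = List.replicate (m + 1) c ++ d :: l by
      simp [List.replicate_succ], ih (some c)]
    simp [List.replicate_succ]

theorem blocksLoop_inv_aux (cs : List Char) (k : Nat) :
    ∀ (s : Nat) (acc : List String × List Int), cs.length - s ≤ k → s < cs.length →
      blocksLoop cs cs.length (buildRuns cs k s) acc =
        (acc.1 ++ tRS (pv cs s) (cs.drop s),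
         acc.2 ++ starsOff (s : Int) (tRS (pv cs s) (cs.drop s))) := by
  induction k with
  | zero => intro s acc hk hs; omega
  | succ k ih =>
    intro s acc hk hs
    obtain ⟨hrE, hrLe, hrNe⟩ := runEnd_spec cs s cs.length (s + 1)
    set e := runEnd cs s cs.length (s + 1) with he
    set c := cs.getD s ' ' with hc
    have hse : s + 1 ≤ e := le_runEnd cs s cs.length (s + 1)
    have heL : e ≤ cs.length := hrLe (by omega)
    obtain ⟨m, hm⟩ : ∃ m, e - s = m + 1 := ⟨e - s - 1, by omega⟩
    have hchars : ∀ i, s ≤ i → i < e → cs.getD i ' ' = c := by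
      intro i h1 h2
      rcases Nat.eq_or_lt_of_le h1 with rfl | hlt
      · rfl
      · exact hrE i (by omega) h2
    have hdecomp : cs.drop s = List.replicate (m + 1) c ++ cs.drop e := by
      have h1 := (List.take_append_drop (e - s) (cs.drop s)).symm
      have h2 : (cs.drop s).drop (e - s) = cs.drop e := by
        rw [List.drop_drop]; congr 1; omega
      have h3 : (cs.drop s).take (e - s) = List.replicate (m + 1) c := by
        refine List.eq_replicate_iff.mpr ⟨?_, ?_⟩
        · simp; omega
        · intro b hb
          obtain ⟨i, hi, hbi⟩ := List.getElem_of_mem hb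
          have hi' : i < e - s := by simp at hi; omega
          rw [List.getElem_take, List.getElem_drop] at hbi
          rw [← hbi, ← List.getD_eq_getElem cs ' ' (by omega)]
          exact hchars (s + i) (by omega) (by omega)
      conv_lhs => rw [h1]
      rw [h2, h3]
    have hbr : buildRuns cs (k + 1) s = (c, s, e) :: buildRuns cs k e := by
      rw [buildRuns, if_pos hs]
    rw [hbr]
    simp only [blocksLoop]
    rcases Nat.lt_or_ge e cs.length with hlt | hge
    · -- there is a next run
      set d := cs.getD e ' ' with hd
      have hdne : d ≠ c := hrNe (by omega) hlt
      have hkpos : ∃ k', k = k' + 1 := ⟨k - 1, by omega⟩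
      obtain ⟨k', hk'⟩ := hkpos
      have hrest : buildRuns cs k e ≠ [] := by rw [hk', buildRuns, if_pos hlt]; simp
      have hh1 : ((buildRuns cs k e).headD (' ', 0, 0)).1 = d := by
        rw [hk', buildRuns, if_pos hlt]
        simp [hd]
      have hdropE : cs.drop e = d :: cs.drop (e + 1) := by
        rw [hd, List.getD_eq_getElem cs ' ' hlt]
        exact (List.getElem_cons_drop hlt).symm
      have hpve : pv cs e = some c := by
        have hx : cs.getD (e - 1) ' ' = c := hchars (e - 1) (by omega) (by omega)
        rw [pv, if_neg (by omega : ¬ e = 0), hx]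
      have hslt : s < cs.length - 1 := by omega
      set T := tRS (pv cs e) (cs.drop e) with hT
      have hoff : ((s : Int) + 1 + (List.replicate m "S").length : Int) = (e : Int) := by
        simp; omega
      have hoffL : ((s : Int) + (List.replicate (m + 1) "L").length : Int) = (e : Int) := by
        simp; omega
      have hSnostar : ∀ x ∈ List.replicate m "S", x ≠ ("*" : String) := by
        intro x hx; rw [List.eq_of_mem_replicate hx]; simp
      have hLnostar : ∀ x ∈ List.replicate (m + 1) "L", x ≠ ("*" : String) := by
        intro x hx; rw [List.eq_of_mem_replicate hx]; simp
      rcases lt_trichotomy c d with hcd | hcd | hcd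
      · -- S-class run
        have hcond : buildRuns cs k e = [] ∨ c < ((buildRuns cs k e).headD (' ', 0, 0)).1 :=
          Or.inr (by rw [hh1]; exact hcd)
        rw [if_pos hcond]
        have htRS : tRS (pv cs s) (cs.drop s) =
            starS (pv cs s) c :: (List.replicate m "S" ++ T) := by
          rw [hdecomp, hdropE, tRS_run_S _ _ _ _ _ hcd, ← hdropE, hT, hpve]
        by_cases hstar : 0 < s ∧ c < cs.getD (s - 1) ' '
        · have hpvs : pv cs s = some (cs.getD (s - 1) ' ') := by
            rw [pv, if_neg (by omega : ¬ s = 0)]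
          have hsS : starS (pv cs s) c = "*" := by
            rw [hpvs]
            show (if c < cs.getD (s - 1) ' ' then "*" else "S") = "*"
            rw [if_pos hstar.2]
          rw [hm, if_pos ⟨hstar.1, hstar.2, hslt⟩, ih e _ (by omega) hlt, ← hT, htRS, hsS]
          have hblock : (List.replicate (m + 1) "S").set 0 "*" = "*" :: List.replicate m "S" := by
            simp [List.replicate_succ]
          have hso : starsOff (s : Int) ("*" :: (List.replicate m "S" ++ T)) =
              [(s : Int)] ++ starsOff (e : Int) T := by
            rw [starsOff_cons, if_pos rfl, starsOff_append,
              starsOff_nostar _ _ hSnostar, hoff]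
            simp
          rw [hso]
          simp only [Prod.mk.injEq]
          refine ⟨?_, ?_⟩
          · simp [hblock, List.append_assoc]
          · simp [List.append_assoc]
        · have hsS : starS (pv cs s) c = "S" := by
            by_cases hz : s = 0
            · rw [pv, if_pos hz]; rfl
            · have hnlt : ¬ c < cs.getD (s - 1) ' ' := fun hx => hstar ⟨by omega, hx⟩
              rw [pv, if_neg hz]
              show (if c < cs.getD (s - 1) ' ' then "*" else "S") = "S"
              rw [if_neg hnlt]
          have hnot : ¬ (0 < s ∧ c < cs.getD (s - 1) ' ' ∧ s < cs.length - 1) := by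
            rintro ⟨h1, h2, -⟩; exact hstar ⟨h1, h2⟩
          rw [hm, if_neg hnot, ih e _ (by omega) hlt, ← hT, htRS, hsS]
          have hso : starsOff (s : Int) ("S" :: (List.replicate m "S" ++ T)) =
              starsOff (e : Int) T := by
            rw [starsOff_cons, if_neg (by simp), starsOff_append,
              starsOff_nostar _ _ hSnostar, hoff]
            simp
          rw [hso]
          simp only [Prod.mk.injEq]
          refine ⟨?_, ?_⟩
          · simp [List.replicate_succ, List.append_assoc]
          · simp [List.append_assoc]
      · exact absurd hcd.symm hdne
      · -- L-class run
        have hcond : ¬ (buildRuns cs k e = [] ∨ c < ((buildRuns cs k e).headD (' ', 0, 0)).1) := by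
          rintro (hx | hx)
          · exact hrest hx
          · rw [hh1] at hx; exact absurd hx (not_lt_of_gt hcd)
        rw [if_neg hcond]
        have htRS : tRS (pv cs s) (cs.drop s) = List.replicate (m + 1) "L" ++ T := by
          rw [hdecomp, hdropE, tRS_run_L _ _ _ _ _ hcd, ← hdropE, hT, hpve]
        rw [hm, ih e _ (by omega) hlt, ← hT, htRS]
        have hso : starsOff (s : Int) (List.replicate (m + 1) "L" ++ T) =
            starsOff (e : Int) T := by
          rw [starsOff_append, starsOff_nostar _ _ hLnostar, hoffL]
          simp
        rw [hso]
        simp only [Prod.mk.injEq]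
        refine ⟨?_, ?_⟩
        · simp [List.append_assoc]
        · simp [List.append_assoc]
    · -- final run: e = cs.length
      have hrest : buildRuns cs k e = [] := buildRuns_nil cs k e (by omega)
      rw [hrest, if_pos (Or.inl rfl)]
      have hdropE : cs.drop e = [] := by
        rw [show e = cs.length by omega]; simp
      have hdecomp' : cs.drop s = List.replicate (m + 1) c := by
        rw [hdecomp, hdropE]; simp
      rw [hdecomp', tRS_run_final]
      simp only [blocksLoop]
      by_cases hm0 : m = 0
      · rw [if_pos hm0]
        have hnot : ¬ (0 < s ∧ c < cs.getD (s - 1) ' ' ∧ s < cs.length - 1) := by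
          rintro ⟨-, -, h3⟩; omega
        rw [hm, if_neg hnot, hm0]
        have hso : starsOff (s : Int) (["S"] : List String) = [] := by
          rw [starsOff_cons, if_neg (by simp)]
          simp [starsOff]
        rw [hso]
        simp
      · rw [if_neg hm0]
        have hslt : s < cs.length - 1 := by omega
        have hSnostar : ∀ x ∈ List.replicate m "S", x ≠ ("*" : String) := by
          intro x hx; rw [List.eq_of_mem_replicate hx]; simp
        by_cases hstar : 0 < s ∧ c < cs.getD (s - 1) ' '
        · have hpvs : pv cs s = some (cs.getD (s - 1) ' ') := by
            rw [pv, if_neg (by omega : ¬ s = 0)]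
          have hsS : starS (pv cs s) c = "*" := by
            rw [hpvs]
            show (if c < cs.getD (s - 1) ' ' then "*" else "S") = "*"
            rw [if_pos hstar.2]
          rw [hm, if_pos ⟨hstar.1, hstar.2, hslt⟩, hsS]
          have hblock : (List.replicate (m + 1) "S").set 0 "*" = "*" :: List.replicate m "S" := by
            simp [List.replicate_succ]
          have hso : starsOff (s : Int) ("*" :: List.replicate m "S") = [(s : Int)] := by
            rw [starsOff_cons, if_pos rfl, starsOff_nostar _ _ hSnostar]
            simp
          rw [hblock, hso]
        · have hsS : starS (pv cs s) c = "S" := by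
            by_cases hz : s = 0
            · rw [pv, if_pos hz]; rfl
            · have hnlt : ¬ c < cs.getD (s - 1) ' ' := fun hx => hstar ⟨by omega, hx⟩
              rw [pv, if_neg hz]
              show (if c < cs.getD (s - 1) ' ' then "*" else "S") = "S"
              rw [if_neg hnlt]
          have hnot : ¬ (0 < s ∧ c < cs.getD (s - 1) ' ' ∧ s < cs.length - 1) := by
            rintro ⟨h1, h2, -⟩; exact hstar ⟨h1, h2⟩
          rw [hm, if_neg hnot, hsS]
          have hso : starsOff (s : Int) ("S" :: List.replicate m "S") = [] := by
            rw [starsOff_cons, if_neg (by simp), starsOff_nostar _ _ hSnostar]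
            simp
          rw [hso]
          simp [List.replicate_succ]

theorem blocksLoop_inv (cs : List Char) (s : Nat) (hs : s < cs.length)
    (acc : List String × List Int) :
    blocksLoop cs cs.length (buildRuns cs cs.length s) acc =
      (acc.1 ++ tRS (pv cs s) (cs.drop s),
       acc.2 ++ starsOff (s : Int) (tRS (pv cs s) (cs.drop s))) :=
  blocksLoop_inv_aux cs cs.length s acc (by omega) hs

theorem B_char (text : String) (h : text.toList ≠ []) :
    define_type_alt text =
      (tR none text.toList,
        ((PySem.List.pyRange 0 (((psiLms text.toList 0).length : Int) - 1) 1).map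
          (fun j => [PySem.List.pyGetD (psiLms text.toList 0) j 0,
                     PySem.List.pyGetD (psiLms text.toList 0) (j + 1) 0])) ++
        [[PySem.List.pyGetD (psiLms text.toList 0) (-1) 0,
          PySem.List.pyGetD (psiLms text.toList 0) (-1) 0]]) := by
  set cs := text.toList with hcs
  have hn : 0 < cs.length := by
    cases hl : cs with
    | nil => exact absurd hl h
    | cons a l => simp [hl]
  obtain ⟨D, hD1, hD2⟩ := tR_tRS_split none cs h
  have hDlen : D.length = cs.length - 1 := by
    have h1 := length_tRS none cs
    rw [hD2] at h1
    simp at h1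
    omega
  have hinv' : blocksLoop cs cs.length (buildRuns cs cs.length 0) ([], []) =
      (tRS none cs, starsOff 0 (tRS none cs)) := by
    have hx := blocksLoop_inv cs 0 hn ([], [])
    simpa [pv] using hx
  have htypes : PySem.List.pySetD (tRS none cs) ((cs.length : Int) - 1) "*" = tR none cs := by
    rw [show ((cs.length : Int) - 1) = ((cs.length - 1 : Nat) : Int) by omega,
      PySem.List.pySetD_natCast, hD2, List.set_append_right _ _ (by omega),
      show cs.length - 1 - D.length = 0 by omega, hD1]
    rfl
  have hstars : starsOff 0 (tRS none cs) ++ [(cs.length : Int) - 1] =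
      starsOff 0 (tR none cs) := by
    rw [hD1, hD2, starsOff_append, starsOff_append]
    have h1 : starsOff (0 + (D.length : Int)) ["S"] = [] := by
      rw [starsOff_cons, if_neg (by simp)]
      simp [starsOff]
    have h2 : starsOff (0 + (D.length : Int)) ["*"] = [0 + (D.length : Int)] := by
      rw [starsOff_cons, if_pos rfl]
      simp [starsOff]
    rw [h1, h2]
    have h3 : (0 + (D.length : Int)) = (cs.length : Int) - 1 := by omega
    simp [h3]
  have hlms : psiLms cs 0 = starsOff 0 (tR none cs) := by simp [psiLms, pv]
  simp only [define_type_alt]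
  rw [← hcs, hinv']
  dsimp only
  rw [htypes, hstars, ← hlms]

-- ===== VERDICT (by name: the statement is the Claim_ definition above) =====
theorem define_type_spec : Claim_equal_define_type := by
  intro text _ hpre
  unfold Spec_define_type
  have h : text.toList ≠ [] := fun hnil => hpre (String.toList_eq_nil_iff.mp hnil)
  rw [A_char text h, B_char text h]
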